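-- pv_equiv track=rewrite | github.com/PriceHardman/think_python | chapter_09_case_study_word_play/9-7_cartalk1.py | has_n_consecutive_double_letters
-- ===== SOURCE A (Python) =====
-- def has_n_consecutive_double_letters(word,n):
--     """Returns a boolean indicating if the word has n sets of consecutive doubleletters."""
--     if len(word) < 2*n:
--         return False
--
--     i = 0
--     while i <= (len(word) - 2*n):
--         current_slice = word[i:2*n+i]
--         matching_pairs_in_current_slice = 0
--         j = 0
--
--         # For the current 2*n-letter slice,
--         # loop through two-by-two, checking to see if the letters
--         # in each pair match one another. Keep track of how many
--         # pairs match, and return True if the count reaches n.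
--         while j < n:
--             current_pair = current_slice[j*2:j*2+2]
--             if current_pair[0]==current_pair[1]:
--                 matching_pairs_in_current_slice += 1
--             j+=1
--         if matching_pairs_in_current_slice==n:
--             return True
--         i+=1
--     return False
-- ===== SOURCE B (Python) =====
-- def has_n_consecutive_double_letters(word, n):
--     """Returns a boolean indicating if the word has n sets of consecutive doubleletters."""
--     # One right-to-left pass: cur is the length of the aligned (stride-2) chain of
--     # matching pairs starting at k; r1 holds the chain length starting at k+1.
--     if n <= 0:
--         return n == 0
--     r1 = r2 = 0
--     for k in range(len(word) - 2, -1, -1):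
--         cur = r2 + 1 if word[k] == word[k + 1] else 0
--         if cur >= n:
--             return True
--         r1, r2 = cur, r1
--     return False
-- ===== Notes on version B (the rewrite author's own statement) =====
-- stated objective: faster
-- what changed: Replaced the sliding-window double scan (for each start i, re-check all n pairs of the 2n-letter slice) by a single right-to-left pass that maintains the stride-2 run length of matching pairs and succeeds as soon as a run reaches n.
import Mathlib
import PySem

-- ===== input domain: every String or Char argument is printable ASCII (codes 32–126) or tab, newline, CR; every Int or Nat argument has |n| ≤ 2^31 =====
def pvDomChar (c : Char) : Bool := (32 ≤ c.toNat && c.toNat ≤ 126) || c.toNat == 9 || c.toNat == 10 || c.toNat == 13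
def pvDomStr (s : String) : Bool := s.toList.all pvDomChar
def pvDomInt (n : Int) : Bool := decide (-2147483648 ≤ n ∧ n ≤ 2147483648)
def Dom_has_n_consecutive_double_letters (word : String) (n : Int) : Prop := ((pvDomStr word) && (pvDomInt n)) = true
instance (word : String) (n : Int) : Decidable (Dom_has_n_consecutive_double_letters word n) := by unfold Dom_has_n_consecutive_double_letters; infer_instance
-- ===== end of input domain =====

-- B replaces A's sliding-window rescan of every 2n-letter slice by one right-to-left pass
-- maintaining stride-2 run lengths of matching pairs (objective: faster, one pass).

-- ===== PORT A =====

-- current_pair[0] == current_pair[1]  (pyGet? is some on every pair A actually builds; `false` arms are unreachable)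
def pvPairEq (p : List Char) : Bool :=
  match PySem.List.pyGet? p 0, PySem.List.pyGet? p 1 with
  | some a, some b => a == b
  | _, _ => false

-- inner `while j < n` loop: counts matching pairs in the current slice
def pvAInner (cs : List Char) (n j cnt : Int) : Int :=
  if _h : j < n then
    let current_pair := PySem.List.slice cs (some (j * 2)) (some (j * 2 + 2))
    pvAInner cs n (j + 1) (if pvPairEq current_pair then cnt + 1 else cnt)
  else cnt
termination_by (n - j).toNat
decreasing_by omega

-- outer `while i <= len(word) - 2*n` loop
def pvAOuter (w : List Char) (n i : Int) : Bool :=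
  if _h : i ≤ (w.length : Int) - 2 * n then
    let current_slice := PySem.List.slice w (some i) (some (2 * n + i))
    if pvAInner current_slice n 0 0 == n then true
    else pvAOuter w n (i + 1)
  else false
termination_by ((w.length : Int) - 2 * n - i + 1).toNat
decreasing_by omega

def has_n_consecutive_double_letters (word : String) (n : Int) : Bool :=
  let w := word.toList
  if (w.length : Int) < 2 * n then false
  else pvAOuter w n 0

-- ===== PORT B =====

-- word[k] == word[k+1]  (k from the descending range, so pyGet? is some there)
def pvBPair (w : List Char) (k : Int) : Bool :=
  match PySem.List.pyGet? w k, PySem.List.pyGet? w (k + 1) with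
  | some a, some b => a == b
  | _, _ => false

-- `for k in range(len(word)-2, -1, -1)` with state (r1, r2), early return on cur >= n
def pvBLoop (w : List Char) (n r1 r2 : Int) : List Int → Bool
  | [] => false
  | k :: rest =>
      let cur := if pvBPair w k then r2 + 1 else 0
      if n ≤ cur then true else pvBLoop w n cur r1 rest

def has_n_consecutive_double_letters_alt (word : String) (n : Int) : Bool :=
  if n ≤ 0 then n == 0
  else
    let w := word.toList
    pvBLoop w n 0 0 (PySem.List.pyRange ((w.length : Int) - 2) (-1) (-1))

-- ===== PRECONDITION & SPEC =====
def Spec_has_n_consecutive_double_letters (word : String) (n : Int) (out : Bool) : Prop := out = has_n_consecutive_double_letters_alt word n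
instance (word : String) (n : Int) (out : Bool) : Decidable (Spec_has_n_consecutive_double_letters word n out) := by unfold Spec_has_n_consecutive_double_letters; infer_instance

-- ===== CLAIM (what is proved, stated in full; the proofs are below) =====
def Claim_equal_has_n_consecutive_double_letters : Prop := ∀ (word : String) (n : Int), Dom_has_n_consecutive_double_letters word n → Spec_has_n_consecutive_double_letters word n (has_n_consecutive_double_letters word n)

-- ===== LEMMAS AND PROOFS =====

-- the common spec: the c aligned (stride-2) pairs starting at m all match
def pvGoodN (w : List Char) (m c : Nat) : Prop :=
  ∀ j : Nat, j < c → pvBPair w ((m + 2 * j : Nat) : Int) = true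

-- equation lemmas for the recursive loops (the `let`s make `split` awkward)
theorem pvAInner_step (cs : List Char) (n j cnt : Int) (h : j < n) :
    pvAInner cs n j cnt = pvAInner cs n (j + 1)
      (if pvPairEq (PySem.List.slice cs (some (j * 2)) (some (j * 2 + 2))) then cnt + 1 else cnt) := by
  rw [pvAInner, dif_pos h]

theorem pvAInner_stop (cs : List Char) (n j cnt : Int) (h : ¬ j < n) :
    pvAInner cs n j cnt = cnt := by
  rw [pvAInner, dif_neg h]

theorem pvAOuter_step (w : List Char) (n i : Int) (h : i ≤ (w.length : Int) - 2 * n) :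
    pvAOuter w n i = if (pvAInner (PySem.List.slice w (some i) (some (2 * n + i))) n 0 0 == n)
      then true else pvAOuter w n (i + 1) := by
  rw [pvAOuter, dif_pos h]

theorem pvAOuter_stop (w : List Char) (n i : Int) (h : ¬ i ≤ (w.length : Int) - 2 * n) :
    pvAOuter w n i = false := by
  rw [pvAOuter, dif_neg h]

theorem pvBLoop_cons (w : List Char) (n r1 r2 k : Int) (rest : List Int) :
    pvBLoop w n r1 r2 (k :: rest) = if n ≤ (if pvBPair w k then r2 + 1 else 0) then true
      else pvBLoop w n (if pvBPair w k then r2 + 1 else 0) r1 rest := rfl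

theorem pvBPair_iff (w : List Char) (k : Nat) :
    pvBPair w (k : Int) = true ↔ k + 1 < w.length ∧ w[k]? = w[k + 1]? := by
  unfold pvBPair
  have h1 : ((k : Int) + 1) = ((k + 1 : Nat) : Int) := by push_cast; ring
  rw [h1, PySem.List.pyGet?_natCast, PySem.List.pyGet?_natCast]
  rcases h0 : w[k]? with _ | a <;> rcases hs : w[k + 1]? with _ | b
  · rw [List.getElem?_eq_none_iff] at h0
    simp only [Bool.false_eq_true, false_iff]
    rintro ⟨hlt, -⟩; omega
  · rw [List.getElem?_eq_none_iff] at h0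
    obtain ⟨hlt, -⟩ := List.getElem?_eq_some_iff.mp hs
    omega
  · rw [List.getElem?_eq_none_iff] at hs
    simp only [Bool.false_eq_true, false_iff]
    rintro ⟨hlt, -⟩; omega
  · obtain ⟨hlt, -⟩ := List.getElem?_eq_some_iff.mp hs
    simp only [beq_iff_eq, Option.some.injEq]
    constructor
    · intro h; exact ⟨by omega, h⟩
    · intro h; exact h.2

theorem pvBPair_lt {w : List Char} {k : Nat} (h : pvBPair w (k : Int) = true) :
    k + 1 < w.length := ((pvBPair_iff w k).mp h).1

theorem pvGoodN_le {w : List Char} {m c : Nat} (hc : 1 ≤ c) (hg : pvGoodN w m c) :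
    m + 2 * c ≤ w.length := by
  have := pvBPair_lt (hg (c - 1) (by omega))
  omega

-- ===== A-side =====

-- A's pair test on the current slice equals the direct pair test at position a + 2*b
theorem pvSlicePair (w : List Char) (a nn b : Nat) (hb : b < nn) (_hlen : a + 2 * nn ≤ w.length) :
    pvPairEq (PySem.List.slice (PySem.List.slice w (some (a : Int)) (some ((2 * nn + a : Nat) : Int)))
        (some ((2 * b : Nat) : Int)) (some ((2 * b + 2 : Nat) : Int)))
      = pvBPair w ((a + 2 * b : Nat) : Int) := by
  rw [PySem.List.slice_natCast, PySem.List.slice_natCast]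
  unfold pvPairEq pvBPair
  have h1 : ((a + 2 * b : Nat) : Int) + 1 = ((a + 2 * b + 1 : Nat) : Int) := by push_cast; ring
  rw [h1, PySem.List.pyGet?_natCast, PySem.List.pyGet?_natCast,
      PySem.List.pyGet?_zero, PySem.List.pyGet?_of_nonneg _ (by norm_num)]
  have e0 : (List.take (2 * b + 2 - 2 * b) (List.drop (2 * b) (List.take (2 * nn + a - a) (List.drop a w))))[(0 : Nat)]?
      = w[a + 2 * b]? := by
    simp only [List.getElem?_take, List.getElem?_drop]
    rw [if_pos (by omega), if_pos (by omega)]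
    congr 1
  have e1 : (List.take (2 * b + 2 - 2 * b) (List.drop (2 * b) (List.take (2 * nn + a - a) (List.drop a w))))[(1 : Int).toNat]?
      = w[a + 2 * b + 1]? := by
    simp only [Int.toNat_one, List.getElem?_take, List.getElem?_drop]
    rw [if_pos (by omega), if_pos (by omega)]
    congr 1
  rw [e0, e1]

-- inner-loop bounds: the count stays between cnt and cnt + (number of remaining j's)
theorem pvAInner_bounds (cs : List Char) (n : Int) : ∀ (f : Nat) (j cnt : Int), (n - j).toNat = f →
    pvAInner cs n j cnt ≤ cnt + (n - j).toNat ∧ cnt ≤ pvAInner cs n j cnt := by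
  intro f
  induction f with
  | zero =>
      intro j cnt hf
      rw [pvAInner_stop cs n j cnt (by omega)]
      omega
  | succ f ih =>
      intro j cnt hf
      rw [pvAInner_step cs n j cnt (by omega)]
      by_cases hp : pvPairEq (PySem.List.slice cs (some (j * 2)) (some (j * 2 + 2))) = true
      · rw [if_pos hp]
        have := ih (j + 1) (cnt + 1) (by omega)
        omega
      · rw [if_neg hp]
        have := ih (j + 1) cnt (by omega)
        omega

-- the count reaches n - j exactly when all remaining pairs match
theorem pvAInner_eq_iff (cs : List Char) (n : Int) : ∀ (f : Nat) (j cnt : Int), (n - j).toNat = f → j ≤ n →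
    (pvAInner cs n j cnt = cnt + (n - j) ↔
      ∀ k : Int, j ≤ k → k < n → pvPairEq (PySem.List.slice cs (some (k * 2)) (some (k * 2 + 2))) = true) := by
  intro f
  induction f with
  | zero =>
      intro j cnt hf hjn
      rw [pvAInner_stop cs n j cnt (by omega)]
      constructor
      · intro _ k hk1 hk2; omega
      · intro _; omega
  | succ f ih =>
      intro j cnt hf hjn
      rw [pvAInner_step cs n j cnt (by omega)]
      by_cases hp : pvPairEq (PySem.List.slice cs (some (j * 2)) (some (j * 2 + 2))) = true
      · rw [if_pos hp]
        have hiff := ih (j + 1) (cnt + 1) (by omega) (by omega)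
        constructor
        · intro he k hk1 hk2
          rcases eq_or_lt_of_le hk1 with rfl | hk1'
          · exact hp
          · exact hiff.mp (by omega) k (by omega) hk2
        · intro hall
          have := hiff.mpr (fun k hk1 hk2 => hall k (by omega) hk2)
          omega
      · rw [if_neg hp]
        have hb := pvAInner_bounds cs n f (j + 1) cnt (by omega)
        constructor
        · intro he; exfalso; omega
        · intro hall; exact absurd (hall j le_rfl (by omega)) hp

-- the window test at start a equals "the nn aligned pairs starting at a all match"
theorem pvInner_char (w : List Char) (a nn : Nat) (hlen : a + 2 * nn ≤ w.length) :
    (pvAInner (PySem.List.slice w (some (a : Int)) (some (2 * (nn : Int) + (a : Int)))) (nn : Int) 0 0 = (nn : Int))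
      ↔ pvGoodN w a nn := by
  have hcast : (2 * (nn : Int) + (a : Int)) = ((2 * nn + a : Nat) : Int) := by push_cast; ring
  rw [hcast]
  have h2 := pvAInner_eq_iff (PySem.List.slice w (some (a : Int)) (some ((2 * nn + a : Nat) : Int)))
    (nn : Int) nn 0 0 (by omega) (by omega)
  rw [show (0 : Int) + ((nn : Int) - 0) = (nn : Int) by ring] at h2
  rw [h2]
  constructor
  · intro hall j hj
    have := hall (j : Int) (by positivity) (by exact_mod_cast hj)
    rw [show ((j : Int) * 2 + 2) = ((2 * j + 2 : Nat) : Int) by push_cast; ring,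
        show ((j : Int) * 2) = ((2 * j : Nat) : Int) by push_cast; ring] at this
    rwa [pvSlicePair w a nn j hj hlen] at this
  · intro hg k hk0 hkn
    obtain ⟨b, rfl⟩ : ∃ b : Nat, k = (b : Int) := ⟨k.toNat, (Int.toNat_of_nonneg hk0).symm⟩
    have hb : b < nn := by exact_mod_cast hkn
    rw [show ((b : Int) * 2 + 2) = ((2 * b + 2 : Nat) : Int) by push_cast; ring,
        show ((b : Int) * 2) = ((2 * b : Nat) : Int) by push_cast; ring]
    rw [pvSlicePair w a nn b hb hlen]
    exact hg b hb

-- outer loop ↔ existence of a good start position at or after i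
theorem pvAOuter_iff (w : List Char) (nn : Nat) (hn : 1 ≤ nn) :
    ∀ (f : Nat) (a : Nat), ((w.length : Int) - 2 * (nn : Int) - (a : Int) + 1).toNat = f →
    (pvAOuter w (nn : Int) (a : Int) = true ↔ ∃ m : Nat, a ≤ m ∧ pvGoodN w m nn) := by
  intro f
  induction f with
  | zero =>
      intro a hf
      rw [pvAOuter_stop w _ _ (by omega)]
      simp only [Bool.false_eq_true, false_iff]
      rintro ⟨m, ham, hg⟩
      have := pvGoodN_le hn hg
      omega
  | succ f ih =>
      intro a hf
      by_cases hi : (a : Int) ≤ (w.length : Int) - 2 * (nn : Int)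
      · rw [pvAOuter_step w _ _ hi]
        have hchar := pvInner_char w a nn (by omega)
        by_cases hcnd : pvAInner (PySem.List.slice w (some (a : Int)) (some (2 * (nn : Int) + (a : Int)))) (nn : Int) 0 0 = (nn : Int)
        · rw [if_pos (by simpa [beq_iff_eq] using hcnd)]
          simp only [true_iff]
          exact ⟨a, le_rfl, hchar.mp hcnd⟩
        · rw [if_neg (by simpa [beq_iff_eq] using hcnd)]
          have hrec := ih (a + 1) (by push_cast; omega)
          rw [show ((a : Int) + 1) = ((a + 1 : Nat) : Int) by push_cast; ring]
          rw [hrec]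
          constructor
          · rintro ⟨m, ham, hg⟩; exact ⟨m, by omega, hg⟩
          · rintro ⟨m, ham, hg⟩
            rcases Nat.eq_or_lt_of_le ham with rfl | hlt
            · exact absurd (hchar.mpr hg) hcnd
            · exact ⟨m, by omega, hg⟩
      · rw [pvAOuter_stop w _ _ hi]
        simp only [Bool.false_eq_true, false_iff]
        rintro ⟨m, ham, hg⟩
        have := pvGoodN_le hn hg
        omega

theorem pvA_iff (w : List Char) (nn : Nat) (hn : 1 ≤ nn) :
    ((if (w.length : Int) < 2 * (nn : Int) then false else pvAOuter w (nn : Int) 0) = true ↔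
      ∃ m : Nat, pvGoodN w m nn) := by
  by_cases hL : (w.length : Int) < 2 * (nn : Int)
  · rw [if_pos hL]
    simp only [Bool.false_eq_true, false_iff]
    rintro ⟨m, hg⟩
    have := pvGoodN_le hn hg
    omega
  · rw [if_neg hL]
    rw [show (0 : Int) = ((0 : Nat) : Int) by simp]
    rw [pvAOuter_iff w nn hn _ 0 rfl]
    constructor
    · rintro ⟨m, -, hg⟩; exact ⟨m, hg⟩
    · rintro ⟨m, hg⟩; exact ⟨m, Nat.zero_le m, hg⟩

-- ===== B-side =====

-- the stride-2 run length of matching pairs starting at k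
def pvRun (w : List Char) (k : Nat) : Nat :=
  if h : pvBPair w (k : Int) = true then
    pvRun w (k + 2) + 1
  else 0
termination_by w.length - k
decreasing_by
  have := pvBPair_lt h
  omega

theorem pvCur (w : List Char) (k : Nat) :
    (if pvBPair w (k : Int) then ((pvRun w (k + 2) : Nat) : Int) + 1 else 0) = ((pvRun w k : Nat) : Int) := by
  conv_rhs => rw [pvRun]
  by_cases h : pvBPair w (k : Int) = true
  · rw [if_pos h, dif_pos h]; push_cast; ring
  · rw [if_neg h, dif_neg h]; simp

theorem pvRun_ge_iff (w : List Char) : ∀ (c k : Nat),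
    (c ≤ pvRun w k ↔ ∀ j : Nat, j < c → pvBPair w ((k + 2 * j : Nat) : Int) = true) := by
  intro c
  induction c with
  | zero => intro k; simp
  | succ c ih =>
      intro k
      rw [pvRun]
      by_cases hp : pvBPair w (k : Int) = true
      · rw [dif_pos hp]
        constructor
        · intro h j hj
          rcases j with _ | j
          · simpa using hp
          · have := (ih (k + 2)).mp (by omega) j (by omega)
            convert this using 3
            omega
        · intro h
          have hall : ∀ j : Nat, j < c → pvBPair w ((k + 2 + 2 * j : Nat) : Int) = true := by
            intro j hj
            have := h (j + 1) (by omega)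
            convert this using 3
            omega
          have := (ih (k + 2)).mpr hall
          omega
      · rw [dif_neg hp]
        constructor
        · omega
        · intro h
          exact absurd (by simpa using h 0 (by omega)) hp

theorem pvRun_zero_of_ge (w : List Char) (k : Nat) (h : w.length ≤ k + 1) : pvRun w k = 0 := by
  rw [pvRun]
  have hnp : ¬ pvBPair w (k : Int) = true := by
    intro hc; have := pvBPair_lt hc; omega
  simp [hnp]

-- B's loop invariant over the descending index range
theorem pvBLoop_inv (w : List Char) (n : Int) : ∀ k : Nat,
    pvBLoop w n ((pvRun w (k + 1) : Nat) : Int) ((pvRun w (k + 2) : Nat) : Int)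
        (PySem.List.pyRange (k : Int) (-1) (-1))
      = decide (∃ m : Nat, m ≤ k ∧ n ≤ ((pvRun w m : Nat) : Int)) := by
  intro k
  induction k with
  | zero =>
      rw [PySem.List.pyRange_neg_one_cons (by simp), PySem.List.pyRange_neg_one_eq_nil (by norm_num)]
      rw [pvBLoop_cons]
      rw [pvCur w 0]
      by_cases hc : n ≤ ((pvRun w 0 : Nat) : Int)
      · rw [if_pos hc]
        symm; rw [decide_eq_true_iff]
        exact ⟨0, le_rfl, hc⟩
      · rw [if_neg hc]
        show false = _
        symm; rw [decide_eq_false_iff_not]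
        rintro ⟨m, hm, h⟩
        interval_cases m
        exact hc h
  | succ k ih =>
      rw [PySem.List.pyRange_neg_one_cons (by omega)]
      rw [pvBLoop_cons]
      rw [pvCur w (k + 1)]
      by_cases hc : n ≤ ((pvRun w (k + 1) : Nat) : Int)
      · rw [if_pos hc]
        symm; rw [decide_eq_true_iff]
        exact ⟨k + 1, le_rfl, hc⟩
      · rw [if_neg hc]
        rw [show (((k + 1 : Nat) : Int) - 1) = ((k : Nat) : Int) by push_cast; ring]
        rw [show ((k + 1) + 1 : Nat) = k + 2 from by omega]
        rw [ih]
        rw [decide_eq_decide]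
        constructor
        · rintro ⟨m, hm, h⟩; exact ⟨m, by omega, h⟩
        · rintro ⟨m, hm, h⟩
          rcases Nat.eq_or_lt_of_le hm with rfl | hlt
          · exact absurd h hc
          · exact ⟨m, by omega, h⟩

theorem pvB_iff (w : List Char) (nn : Nat) (hn : 1 ≤ nn) :
    (pvBLoop w (nn : Int) 0 0 (PySem.List.pyRange ((w.length : Int) - 2) (-1) (-1)) = true ↔
      ∃ m : Nat, pvGoodN w m nn) := by
  by_cases hL : 2 ≤ w.length
  · rw [show ((w.length : Int) - 2) = ((w.length - 2 : Nat) : Int) by push_cast [Nat.cast_sub hL]; ring]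
    have e1 : pvRun w (w.length - 2 + 1) = 0 := pvRun_zero_of_ge w _ (by omega)
    have e2 : pvRun w (w.length - 2 + 2) = 0 := pvRun_zero_of_ge w _ (by omega)
    have hinv := pvBLoop_inv w (nn : Int) (w.length - 2)
    rw [e1, e2] at hinv
    simp only [Nat.cast_zero] at hinv
    rw [hinv, decide_eq_true_iff]
    constructor
    · rintro ⟨m, hm, h⟩
      refine ⟨m, ?_⟩
      have hrun : nn ≤ pvRun w m := by exact_mod_cast h
      exact fun j hj => ((pvRun_ge_iff w nn m).mp hrun) j hj
    · rintro ⟨m, hg⟩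
      have hrun : nn ≤ pvRun w m := (pvRun_ge_iff w nn m).mpr (fun j hj => hg j hj)
      have hle := pvGoodN_le hn hg
      exact ⟨m, by omega, by exact_mod_cast hrun⟩
  · rw [PySem.List.pyRange_neg_one_eq_nil (by omega)]
    show false = _ ↔ _
    constructor
    · intro h; cases h
    · rintro ⟨m, hg⟩
      have := pvGoodN_le hn hg
      omega

-- n < 0: A's outer loop runs to the end and returns False
theorem pvAOuter_neg (w : List Char) (n : Int) (hn : n < 0) : ∀ (f : Nat) (i : Int),
    ((w.length : Int) - 2 * n - i + 1).toNat = f → pvAOuter w n i = false := by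
  intro f
  induction f with
  | zero =>
      intro i hf
      rw [pvAOuter_stop w n i (by omega)]
  | succ f ih =>
      intro i hf
      by_cases hi : i ≤ (w.length : Int) - 2 * n
      · rw [pvAOuter_step w n i hi]
        rw [pvAInner_stop _ n 0 0 (by omega)]
        rw [if_neg (by simp; omega)]
        exact ih (i + 1) (by omega)
      · rw [pvAOuter_stop w n i hi]

-- ===== VERDICT (by name: the statement is the Claim_ definition above) =====
theorem has_n_consecutive_double_letters_spec : Claim_equal_has_n_consecutive_double_letters := by
  intro word n _
  unfold Spec_has_n_consecutive_double_letters
  unfold has_n_consecutive_double_letters has_n_consecutive_double_letters_alt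
  by_cases h0 : n ≤ 0
  · rw [if_pos h0]
    by_cases hz : n = 0
    · subst hz
      rw [if_neg (by omega)]
      rw [show ((0 : Int) == 0) = true from rfl]
      rw [pvAOuter_step word.toList 0 0 (by omega)]
      rw [pvAInner_stop _ 0 0 0 (by omega)]
      rw [show ((0 : Int) == 0) = true from rfl]
      rfl
    · have hneg : n < 0 := by omega
      rw [if_neg (by omega : ¬ (word.toList.length : Int) < 2 * n)]
      rw [pvAOuter_neg word.toList n hneg _ 0 rfl]
      rw [show (n == 0) = false from by simp [hz]]
  · have h1 : 1 ≤ n := by omega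
    rw [if_neg h0]
    obtain ⟨nn, rfl⟩ : ∃ nn : Nat, n = (nn : Int) := ⟨n.toNat, (Int.toNat_of_nonneg (by omega)).symm⟩
    have hnn : 1 ≤ nn := by exact_mod_cast h1
    rw [Bool.eq_iff_iff]
    show _ ↔ pvBLoop word.toList (nn : Int) 0 0
      (PySem.List.pyRange ((word.toList.length : Int) - 2) (-1) (-1)) = true
    exact (pvA_iff word.toList nn hnn).trans (pvB_iff word.toList nn hnn).symm
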